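-- pv_equiv track=rewrite | github.com/JudicaelPoumay/Complex-Term-Extraction | Ngrams.py | hasNoSymbols
-- ===== SOURCE A (Python) =====
-- def hasNoSymbols(list):
--     symbols = ["’",".",",",";",":","?","!","(",")","[","]","{","}","-","—","_","$","£",
--                 "€","|","&","#","%","+","*","/","\\","<",">"]
--     for s in symbols:
--         for l in list:
--             if(s in l and len(l) < 4):
--                 return False
--     return True
-- ===== SOURCE B (Python) =====
-- def hasNoSymbols(list):
--     # Stage 1: aggregate every character occurring in a short (<4) element.
--     short_chars = set()
--     for l in list:
--         if len(l) < 4: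
--             short_chars.update(l)
--     # Stage 2: one disjointness test against the symbol alphabet.
--     return short_chars.isdisjoint("\u2019.,;:?!()[]{}-\u2014_$\u00a3\u20ac|&#%+*/\\<>")
-- ===== Notes on version B (the rewrite author's own statement) =====
-- stated objective: faster
-- what changed: Instead of A's early-exit nested scan (each of 29 symbols substring-searched in each element), B first aggregates the characters of all short (<4) elements into one set in a single pass, then decides the answer by one set-disjointness test against the symbol alphabet.
import Mathlib
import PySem

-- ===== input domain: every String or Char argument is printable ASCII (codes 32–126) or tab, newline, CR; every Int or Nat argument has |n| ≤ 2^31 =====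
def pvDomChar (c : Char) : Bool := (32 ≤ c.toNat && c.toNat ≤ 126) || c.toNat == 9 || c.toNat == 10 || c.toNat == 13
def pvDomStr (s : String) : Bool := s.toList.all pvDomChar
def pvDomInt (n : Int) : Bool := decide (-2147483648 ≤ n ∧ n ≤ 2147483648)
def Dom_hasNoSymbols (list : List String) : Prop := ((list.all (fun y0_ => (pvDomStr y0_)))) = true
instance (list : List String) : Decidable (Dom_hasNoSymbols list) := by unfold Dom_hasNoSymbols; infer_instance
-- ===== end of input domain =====

-- B aggregates the characters of all short (<4) elements into one set and decides by a single
-- set-disjointness test against the symbol alphabet, instead of A's early-exit nested substring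
-- scan (objective: alternative, same result).

-- ===== PORT A =====
def pvSymbols : List String := ["’",".",",",";",":","?","!","(",")","[","]","{","}","-","—","_","$","£",
  "€","|","&","#","%","+","*","/","\\","<",">"]

-- A's nested loops with early 'return False' = any over symbols of any over list
def hasNoSymbols (list : List String) : Bool :=
  !(pvSymbols.any (fun s => list.any (fun l => PySem.Str.isIn s l && decide (PySem.Str.len l < 4))))

-- ===== PORT B =====
def pvSymChars : List Char := ['’', '.', ',', ';', ':', '?', '!', '(', ')', '[', ']', '{', '}', '-', '—', '_', '$', '£', '€', '|', '&', '#', '%', '+', '*', '/', '\\', '<', '>']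

-- stage 1 of Source B: the loop 'for l in list: if len(l) < 4: short_chars.update(l)'
def pvShortChars (list : List String) : PySem.Set Char :=
  list.foldl (fun s l => if PySem.Str.len l < 4 then PySem.Set.update s l.toList else s) PySem.Set.empty

-- stage 2 of Source B: short_chars.isdisjoint(symbol string)
def hasNoSymbols_alt (list : List String) : Bool :=
  PySem.Set.isdisjoint (pvShortChars list) pvSymChars

-- ===== PRECONDITION & SPEC =====
def Spec_hasNoSymbols (list : List String) (out : Bool) : Prop := out = hasNoSymbols_alt list
instance (list : List String) (out : Bool) : Decidable (Spec_hasNoSymbols list out) := by unfold Spec_hasNoSymbols; infer_instance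

-- ===== CLAIM (what is proved, stated in full; the proofs are below) =====
def Claim_equal_hasNoSymbols : Prop := ∀ (list : List String), Dom_hasNoSymbols list → Spec_hasNoSymbols list (hasNoSymbols list)

-- ===== LEMMAS AND PROOFS =====

-- a one-character string is a substring of l iff its character occurs in l
theorem isIn_single (c : Char) (s l : String) (h : s.toList = [c]) :
    PySem.Str.isIn s l = true ↔ c ∈ l.toList := by
  rw [PySem.Str.isIn_iff_infix, h]
  constructor
  · rintro ⟨u, v, hv⟩
    exact hv ▸ (by simp)
  · intro hc
    obtain ⟨u, v, hv⟩ := List.append_of_mem hc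
    exact ⟨u, v, by simp [hv]⟩

-- membership in the aggregated set of stage 1
theorem mem_shortChars (list : List String) (c : Char) :
    c ∈ pvShortChars list ↔ ∃ l ∈ list, PySem.Str.len l < 4 ∧ c ∈ l.toList := by
  unfold pvShortChars
  suffices h : ∀ (s : PySem.Set Char),
      c ∈ list.foldl (fun s l => if PySem.Str.len l < 4 then PySem.Set.update s l.toList else s) s ↔
        c ∈ s ∨ ∃ l ∈ list, PySem.Str.len l < 4 ∧ c ∈ l.toList by
    simpa [PySem.Set.empty] using h PySem.Set.empty
  induction list with
  | nil => simp
  | cons a t ih =>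
    intro s
    simp only [List.foldl_cons, ih]
    by_cases ha : a.length < 4
    · simp [PySem.Str.len, ha, PySem.Set.mem_update]
      tauto
    · simp [PySem.Str.len, ha]

-- correspondence between A's one-character symbol strings and B's symbol characters
theorem sym_correspond (l : String) :
    (∃ s ∈ pvSymbols, PySem.Str.isIn s l = true) ↔ ∃ c ∈ l.toList, c ∈ pvSymChars := by
  constructor
  · rintro ⟨s, hs, hin⟩
    have h : pvSymChars.any (fun c => s.toList == [c]) = true := by
      fin_cases hs <;> decide
    simp only [List.any_eq_true, beq_iff_eq] at h
    obtain ⟨c, hc, hts⟩ := h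
    exact ⟨c, (isIn_single c s l hts).1 hin, hc⟩
  · rintro ⟨c, hmem, hc⟩
    have h : pvSymbols.any (fun s => s.toList == [c]) = true := by
      fin_cases hc <;> decide
    simp only [List.any_eq_true, beq_iff_eq] at h
    obtain ⟨s, hs, hts⟩ := h
    exact ⟨s, hs, (isIn_single c s l hts).2 hmem⟩

theorem main_eq (list : List String) : hasNoSymbols list = hasNoSymbols_alt list := by
  unfold hasNoSymbols hasNoSymbols_alt
  rw [Bool.eq_iff_iff]
  rw [PySem.Set.isdisjoint_iff]
  simp only [Bool.not_eq_true', List.any_eq_false, mem_shortChars]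
  constructor
  · rintro h c ⟨l, hl, hlen, hc⟩ hcs
    obtain ⟨s, hs, hin⟩ := (sym_correspond l).2 ⟨c, hc, hcs⟩
    exact h s hs (List.any_eq_true.2 ⟨l, hl, by
      simp only [Bool.and_eq_true, decide_eq_true_eq]
      exact ⟨hin, hlen⟩⟩)
  · intro h s hs hany
    rw [List.any_eq_true] at hany
    obtain ⟨l, hl, hconj⟩ := hany
    rw [Bool.and_eq_true, decide_eq_true_eq] at hconj
    obtain ⟨hin, hlen⟩ := hconj
    obtain ⟨c, hc, hcs⟩ := (sym_correspond l).1 ⟨s, hs, hin⟩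
    exact h c ⟨l, hl, hlen, hc⟩ hcs

-- ===== VERDICT (by name: the statement is the Claim_ definition above) =====
theorem hasNoSymbols_spec : Claim_equal_hasNoSymbols := by
  intro list _
  exact main_eq list
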